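-- pv_equiv track=rewrite | github.com/martin-papy/pdf2foundry | tests/e2e/utils/validation.py | _is_valid_uuid_reference
-- ===== SOURCE A (Python) =====
-- def _is_valid_uuid_reference(uuid_ref: str) -> bool:
--     """Validate UUID reference format."""
--     # Basic format check for Foundry UUID references
--     # Should be like: JournalEntry.abcdef1234567890.JournalEntryPage.1234567890abcdef
--     parts = uuid_ref.split(".")
--
--     if len(parts) < 2:
--         return False
--
--     # Check that IDs are hexadecimal and proper length
--     for i in range(1, len(parts), 2):
--         if i < len(parts):
--             id_part = parts[i]
--             if len(id_part) != 16 or not all(c in "0123456789abcdef" for c in id_part):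
--                 return False
--
--     return True
-- ===== SOURCE B (Python) =====
-- def _is_valid_uuid_reference(uuid_ref: str) -> bool:
--     """Validate UUID reference format (single pass, no split)."""
--     odd = False        # parity of the current dot-separated segment
--     count = 0          # characters seen in the current segment
--     ok = True          # current odd segment all-hex so far
--     seen_dot = False
--     for c in uuid_ref:
--         if c == ".":
--             if odd and not (ok and count == 16):
--                 return False
--             odd = not odd
--             count = 0
--             ok = True
--             seen_dot = True
--         else:
--             if odd:
--                 if c not in "0123456789abcdef":
--                     ok = False
--                 count += 1
--     if not seen_dot:
--         return False
--     if odd and not (ok and count == 16):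
--         return False
--     return True
-- ===== Notes on version B (the rewrite author's own statement) =====
-- stated objective: alternative
-- what changed: Replaced split-into-parts plus an index loop over odd positions with a single character-level pass that validates odd segments on the fly (no intermediate parts list).
import Mathlib
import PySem

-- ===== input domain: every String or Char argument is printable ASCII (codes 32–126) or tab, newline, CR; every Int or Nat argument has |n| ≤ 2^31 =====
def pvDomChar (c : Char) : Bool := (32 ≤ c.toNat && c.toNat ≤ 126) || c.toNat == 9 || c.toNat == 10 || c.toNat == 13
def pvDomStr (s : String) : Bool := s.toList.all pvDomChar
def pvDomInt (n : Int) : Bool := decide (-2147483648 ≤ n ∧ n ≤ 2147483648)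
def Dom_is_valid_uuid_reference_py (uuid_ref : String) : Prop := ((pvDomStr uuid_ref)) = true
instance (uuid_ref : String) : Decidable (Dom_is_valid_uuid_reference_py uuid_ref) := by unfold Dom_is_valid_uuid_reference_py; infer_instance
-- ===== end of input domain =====

-- B replaces A's split-into-parts plus an index loop over the odd positions by a single
-- character-level pass that validates odd segments on the fly; objective: alternative (same O(n) cost).

-- ===== PORT A =====
-- the hex alphabet "0123456789abcdef" as a list of chars (shared by both ports)
def pvHex : List Char := "0123456789abcdef".toList

def pvALoop (parts : List String) : List Int → Bool
  | [] => true
  | i :: rest =>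
      if i < (parts.length : Int) then
        let id_part := PySem.List.pyGetD parts i ""
        if !(PySem.Str.len id_part == (16 : Int)) || !(id_part.toList.all (fun c => PySem.Chars.isIn [c] pvHex)) then
          false
        else pvALoop parts rest
      else pvALoop parts rest

def is_valid_uuid_reference_py (uuid_ref : String) : Bool :=
  let parts := (PySem.Str.split? uuid_ref ".").getD []
  if parts.length < 2 then false
  else pvALoop parts (PySem.List.pyRange 1 (parts.length : Int) 2)

-- ===== PORT B =====
def pvBLoop : List Char → Bool → Nat → Bool → Bool → Bool
  | [], odd, count, ok, seen => seen && (!odd || (ok && count == 16))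
  | c :: rest, odd, count, ok, seen =>
      if c = '.' then
        if odd && !(ok && count == 16) then false
        else pvBLoop rest (!odd) 0 true true
      else
        if odd then pvBLoop rest odd (count + 1) (ok && PySem.Chars.isIn [c] pvHex) seen
        else pvBLoop rest odd count ok seen

def is_valid_uuid_reference_py_alt (uuid_ref : String) : Bool :=
  pvBLoop uuid_ref.toList false 0 true false

-- ===== PRECONDITION & SPEC =====
def Spec_is_valid_uuid_reference_py (uuid_ref : String) (out : Bool) : Prop := out = is_valid_uuid_reference_py_alt uuid_ref
instance (uuid_ref : String) (out : Bool) : Decidable (Spec_is_valid_uuid_reference_py uuid_ref out) := by unfold Spec_is_valid_uuid_reference_py; infer_instance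

-- ===== CLAIM (what is proved, stated in full; the proofs are below) =====
def Claim_equal_is_valid_uuid_reference_py : Prop := ∀ (uuid_ref : String), Dom_is_valid_uuid_reference_py uuid_ref → Spec_is_valid_uuid_reference_py uuid_ref (is_valid_uuid_reference_py uuid_ref)

-- ===== LEMMAS AND PROOFS =====

def pvParts : List Char → List (List Char)
  | [] => [[]]
  | c :: cs => if c = '.' then [] :: pvParts cs else ((c :: (pvParts cs).headI) :: (pvParts cs).tail)

lemma pvParts_ne_nil (cs : List Char) : pvParts cs ≠ [] := by
  cases cs with
  | nil => simp [pvParts]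
  | cons c cs => simp only [pvParts]; split <;> simp

lemma pvParts_eq_cons (cs : List Char) : pvParts cs = (pvParts cs).headI :: (pvParts cs).tail := by
  cases h : pvParts cs with
  | nil => exact absurd h (pvParts_ne_nil cs)
  | cons p ps => simp

lemma splitOn_go_spec : ∀ (fuel : Nat) (cs cur : List Char) (acc : List (List Char)),
    cs.length < fuel →
    PySem.Chars.splitOn.go ['.'] fuel cs cur acc
      = acc.reverse ++ ((cur.reverse ++ (pvParts cs).headI) :: (pvParts cs).tail) := by
  intro fuel
  induction fuel with
  | zero => intro cs cur acc h; omega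
  | succ fuel ih =>
    intro cs cur acc h
    cases cs with
    | nil => simp [PySem.Chars.splitOn.go, pvParts]
    | cons c rest =>
      by_cases hc : c = '.'
      · subst hc
        have hp : List.isPrefixOf ['.'] ('.' :: rest) = true := by simp [List.isPrefixOf]
        rw [PySem.Chars.splitOn.go]
        simp only [hp, if_pos, List.length_cons, List.drop_succ_cons, List.length_nil, List.drop_zero]
        rw [ih rest [] (cur.reverse :: acc) (by simp at h; omega)]
        conv_rhs => rw [show pvParts ('.' :: rest) = [] :: pvParts rest from by simp [pvParts],
          pvParts_eq_cons rest]
        simp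
      · have hp : List.isPrefixOf ['.'] (c :: rest) = false := by
          simp [List.isPrefixOf]; exact fun h => absurd h.symm hc
        rw [PySem.Chars.splitOn.go]
        simp only [hp, Bool.false_eq_true, if_false]
        rw [ih rest (c :: cur) acc (by simp at h; omega)]
        simp [pvParts, hc]

lemma splitOn_eq_pvParts (cs : List Char) : PySem.Chars.splitOn cs ['.'] = pvParts cs := by
  rw [PySem.Chars.splitOn, splitOn_go_spec (cs.length + 1) cs [] [] (by omega)]
  simp [← pvParts_eq_cons]

def pvGoodC (p : List Char) : Bool := (p.length == 16) && p.all (fun c => PySem.Chars.isIn [c] pvHex)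

def pvGoodCont (count : Nat) (ok : Bool) (p : List Char) : Bool :=
  (count + p.length == 16) && ok && p.all (fun c => PySem.Chars.isIn [c] pvHex)

def pvCheck : List (List Char) → Bool → Bool
  | [], _ => true
  | p :: ps, b => (!b || pvGoodC p) && pvCheck ps (!b)

lemma pvParts_length_pos (cs : List Char) : 0 < (pvParts cs).length :=
  List.length_pos_of_ne_nil (pvParts_ne_nil cs)

lemma pvBLoop_spec : ∀ (cs : List Char) (odd : Bool) (count : Nat) (ok seen : Bool),
    pvBLoop cs odd count ok seen
      = ((seen || decide (2 ≤ (pvParts cs).length))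
          && ((!odd || pvGoodCont count ok (pvParts cs).headI) && pvCheck (pvParts cs).tail (!odd))) := by
  intro cs
  induction cs with
  | nil =>
    intro odd count ok seen
    cases odd <;> cases ok <;> cases seen <;>
      simp [pvBLoop, pvParts, pvGoodCont, pvCheck, Bool.and_comm]
  | cons c rest ih =>
    intro odd count ok seen
    by_cases hc : c = '.'
    · subst hc
      have hP : pvParts ('.' :: rest) = [] :: pvParts rest := by simp [pvParts]
      have hlen : 1 ≤ (pvParts rest).length := pvParts_length_pos rest
      have hck : pvCheck (pvParts rest) (!odd)
          = ((!(!odd) || pvGoodC ((pvParts rest).headI)) && pvCheck ((pvParts rest).tail) (!(!odd))) := by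
        conv_lhs => rw [pvParts_eq_cons rest]
        simp [pvCheck]
      have hg : pvGoodCont 0 true ((pvParts rest).headI) = pvGoodC ((pvParts rest).headI) := by
        simp [pvGoodCont, pvGoodC]
      rw [show pvBLoop ('.' :: rest) odd count ok seen
            = if odd && !(ok && count == 16) then false else pvBLoop rest (!odd) 0 true true
          from by simp [pvBLoop]]
      rw [ih, hP]
      simp only [List.headI_cons, List.tail_cons]
      rw [hck, hg]
      simp only [Bool.not_not]
      cases odd <;> cases ok <;> by_cases h16 : count = 16 <;>
        simp [h16, hlen, pvGoodCont, Bool.and_comm]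
    · have hP : pvParts (c :: rest) = (c :: (pvParts rest).headI) :: (pvParts rest).tail := by
        simp [pvParts, hc]
      have hlen2 : ((c :: (pvParts rest).headI) :: (pvParts rest).tail).length
          = (pvParts rest).length := by
        conv_rhs => rw [pvParts_eq_cons rest]
        simp
      rw [show pvBLoop (c :: rest) odd count ok seen
            = if odd then pvBLoop rest odd (count + 1) (ok && PySem.Chars.isIn [c] pvHex) seen
              else pvBLoop rest odd count ok seen
          from by simp [pvBLoop, hc]]
      cases odd with
      | false =>
        rw [if_neg (by simp), ih, hP, hlen2]
        simp
      | true =>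
        rw [ih, hP, hlen2]
        simp only [List.headI_cons, List.tail_cons, Bool.not_true, Bool.false_or, if_pos]
        have hcont : pvGoodCont (count + 1) (ok && PySem.Chars.isIn [c] pvHex) ((pvParts rest).headI)
            = pvGoodCont count ok (c :: (pvParts rest).headI) := by
          simp only [pvGoodCont, List.all_cons, List.length_cons]
          have hn : count + ((pvParts rest).headI.length + 1) = count + 1 + (pvParts rest).headI.length := by omega
          rw [hn]
          cases ok <;> cases hcx : PySem.Chars.isIn [c] pvHex <;>
            simp [Bool.and_comm]
        rw [hcont]

lemma pvALoop_all (parts : List String) : ∀ (l : List Int),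
    pvALoop parts l
      = l.all (fun i => !(decide (i < (parts.length : Int)))
          || ((PySem.Str.len (PySem.List.pyGetD parts i "") == (16 : Int))
              && (PySem.List.pyGetD parts i "").toList.all (fun c => PySem.Chars.isIn [c] pvHex))) := by
  intro l
  induction l with
  | nil => simp [pvALoop]
  | cons i rest ih =>
    by_cases hi : i < (parts.length : Int)
    · rw [show pvALoop parts (i :: rest)
            = if !(PySem.Str.len (PySem.List.pyGetD parts i "") == (16 : Int))
                 || !((PySem.List.pyGetD parts i "").toList.all (fun c => PySem.Chars.isIn [c] pvHex)) then
                false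
              else pvALoop parts rest
          from by simp [pvALoop, hi]]
      rw [ih]
      simp only [List.all_cons]
      rw [show (decide (i < (parts.length : Int))) = true from decide_eq_true hi]
      cases h1 : (PySem.Str.len (PySem.List.pyGetD parts i "") == (16 : Int)) <;>
        cases h2 : ((PySem.List.pyGetD parts i "").toList.all (fun c => PySem.Chars.isIn [c] pvHex)) <;>
          rfl
    · rw [show pvALoop parts (i :: rest) = pvALoop parts rest from by simp [pvALoop, hi]]
      rw [ih]
      simp [hi]

lemma pvParity (j : Nat) (b : Bool) : (decide ((j + 1) % 2 = 0) = b) ↔ (decide (j % 2 = 0) = !b) := by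
  cases b <;> simp <;> omega

lemma pvCheck_iff (ps : List (List Char)) : ∀ (b : Bool),
    pvCheck ps b = true ↔ ∀ i (h : i < ps.length), (decide (i % 2 = 0) = b) → pvGoodC ps[i] = true := by
  induction ps with
  | nil => intro b; simp [pvCheck]
  | cons p ps ih =>
    intro b
    simp only [pvCheck, Bool.and_eq_true, Bool.or_eq_true, ih]
    constructor
    · rintro ⟨h1, h2⟩ i hi hpar
      cases i with
      | zero =>
        simp at hpar
        rcases h1 with h1 | h1
        · rw [hpar] at h1; simp at h1
        · simpa using h1
      | succ j =>
        have := (pvParity j b).mp hpar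
        simpa using h2 j (by simpa using hi) this
    · intro h
      constructor
      · cases hb : b
        · simp
        · right
          have := h 0 (by simp) (by simp [hb])
          simpa using this
      · intro j hj hpar
        have := h (j + 1) (by simpa using hj) ((pvParity j b).mpr (by simpa using hpar))
        simpa using this

-- per-part checks agree: A's string-level test is B's char-level pvGoodC
lemma pvGoodS_eq (p : String) :
    ((PySem.Str.len p == (16 : Int)) && p.toList.all (fun c => PySem.Chars.isIn [c] pvHex))
      = pvGoodC p.toList := by
  have : (PySem.Str.len p == (16 : Int)) = (p.toList.length == 16) := by
    simp [PySem.Str.len]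
    omega
  rw [pvGoodC, this]

lemma pvMain (uuid_ref : String) :
    is_valid_uuid_reference_py uuid_ref = is_valid_uuid_reference_py_alt uuid_ref := by
  cases hsp : PySem.Str.split? uuid_ref "." with
  | none =>
    have hb := PySem.Str.split?_map uuid_ref "."
    rw [hsp] at hb
    simp [PySem.Chars.split?] at hb
  | some ps =>
    have hb := PySem.Str.split?_map uuid_ref "."
    rw [hsp] at hb
    simp only [Option.map_some, PySem.Chars.split?, List.isEmpty_cons, Bool.false_eq_true,
      if_false, Option.some_inj, show (".".toList) = ['.'] from rfl,
      splitOn_eq_pvParts] at hb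
    have hlen : ps.length = (pvParts uuid_ref.toList).length := by
      rw [← hb]; simp
    have hAdef : is_valid_uuid_reference_py uuid_ref
        = if ps.length < 2 then false
          else pvALoop ps (PySem.List.pyRange 1 (ps.length : Int) 2) := by
      simp [is_valid_uuid_reference_py, hsp]
    have hBdef : is_valid_uuid_reference_py_alt uuid_ref
        = (decide (2 ≤ (pvParts uuid_ref.toList).length)
            && pvCheck (pvParts uuid_ref.toList).tail true) := by
      rw [is_valid_uuid_reference_py_alt, pvBLoop_spec]
      simp [pvGoodCont]
    rw [hAdef, hBdef]
    by_cases h2 : ps.length < 2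
    · rw [if_pos h2]
      rw [show decide (2 ≤ (pvParts uuid_ref.toList).length) = false from by
        rw [decide_eq_false_iff_not]; omega]
      simp
    · rw [if_neg h2]
      rw [show decide (2 ≤ (pvParts uuid_ref.toList).length) = true from by
        rw [decide_eq_true_eq]; omega]
      rw [Bool.true_and, Bool.eq_iff_iff]
      rw [pvALoop_all, List.all_eq_true, pvCheck_iff]
      have htl : (pvParts uuid_ref.toList).tail.length = ps.length - 1 := by
        rw [← hb]; simp [List.length_tail]
    -- index bridge
      have hgt : ∀ (i : Nat) (h : i < (pvParts uuid_ref.toList).tail.length),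
          (pvParts uuid_ref.toList).tail[i] = (ps[i + 1]'(by omega)).toList := by
        intro i h
        simp only [List.getElem_tail, ← hb, List.getElem_map]
      constructor
      · intro h i hi hpar
        have hi1 : i + 1 < ps.length := by omega
        have hmem : ((i + 1 : Nat) : Int) ∈ PySem.List.pyRange 1 (ps.length : Int) 2 := by
          rw [PySem.List.mem_pyRange_iff_of_pos (by norm_num)]
          refine ⟨by exact_mod_cast Nat.le_add_left 1 i, by exact_mod_cast hi1, ?_⟩
          simp at hpar
          omega
        have hfx := h _ hmem
        rw [show decide (((i + 1 : Nat) : Int) < (ps.length : Int)) = true from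
          decide_eq_true (by exact_mod_cast hi1)] at hfx
        rw [PySem.List.pyGetD_eq_getElem ps "" (by positivity) (by exact_mod_cast hi1)] at hfx
        simp only [Bool.not_true, Bool.false_or] at hfx
        rw [pvGoodS_eq] at hfx
        rw [hgt i hi]
        simpa using hfx
      · intro h x hx
        rw [PySem.List.mem_pyRange_iff_of_pos (by norm_num)] at hx
        obtain ⟨hx1, hx2, hx3⟩ := hx
        have hxn : x = ((x.toNat : Nat) : Int) := by omega
        have hxlt : x.toNat < ps.length := by omega
        rw [show decide (x < (ps.length : Int)) = true from decide_eq_true (by omega)]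
        rw [PySem.List.pyGetD_eq_getElem ps "" (by omega) hx2]
        simp only [Bool.not_true, Bool.false_or]
        rw [pvGoodS_eq]
        have hodd : x.toNat % 2 = 1 := by omega
        have hi : x.toNat - 1 < (pvParts uuid_ref.toList).tail.length := by omega
        have := h (x.toNat - 1) hi (by simp; omega)
        rw [hgt _ hi] at this
        have hix : x.toNat - 1 + 1 = x.toNat := by omega
        simp only [hix] at this
        exact this

-- ===== VERDICT (by name: the statement is the Claim_ definition above) =====
theorem is_valid_uuid_reference_py_spec : Claim_equal_is_valid_uuid_reference_py := by
  intro uuid_ref _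
  exact pvMain uuid_ref
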